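-- pv_equiv track=rewrite | github.com/smlund/warp_uem | discrete_fourspace/time.py | get_steps_by_times
-- ===== SOURCE A (Python) =====
-- def get_steps_by_times(times,chosen_times):
--   """
--   Returns a list of iteration steps (think indices)
--   corresponding to the first time after each of the
--   sorted eval_times.
--   Args:
--     times: A list of times corresponding to when
--       a simulation step will occur.
--     chosen_times: A list of approximate times at which
--       we wish to get the time step.
--   Return value:
--     time_steps: The integer steps corresponding to the
--       least time greater than the chosen times.
--   """
--
--   time_steps = []
--   chosen_index = 0
--   for i in range(len(times)):
--     if times[i] >= chosen_times[chosen_index]: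
--       time_steps.append(i)
--       chosen_index += 1
--       if chosen_index == len(chosen_times): #We're done
--         return time_steps
--   if chosen_index != len(chosen_times): #In case the last chosen time(s) is past the end of times.
--     time_steps.append(i)
--   return time_steps
-- ===== SOURCE B (Python) =====
-- def get_steps_by_times(times, chosen_times):
--     # Inverted two-pointer: iterate over chosen_times, advancing one cursor
--     # through times; A instead iterates over times with an index into chosen_times.
--     time_steps = []
--     n = len(times)
--     i = 0
--     for t in chosen_times:
--         while i < n and times[i] < t:
--             i += 1
--         if i == n:
--             time_steps.append(n - 1)
--             break
--         time_steps.append(i)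
--         i += 1
--     return time_steps
-- ===== Notes on version B (the rewrite author's own statement) =====
-- stated objective: alternative
-- what changed: B inverts the loop structure: it iterates over chosen_times, advancing a single cursor through times with an inner while-scan, instead of A's loop over all time indices carrying an index into chosen_times with early return.
import Mathlib
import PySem

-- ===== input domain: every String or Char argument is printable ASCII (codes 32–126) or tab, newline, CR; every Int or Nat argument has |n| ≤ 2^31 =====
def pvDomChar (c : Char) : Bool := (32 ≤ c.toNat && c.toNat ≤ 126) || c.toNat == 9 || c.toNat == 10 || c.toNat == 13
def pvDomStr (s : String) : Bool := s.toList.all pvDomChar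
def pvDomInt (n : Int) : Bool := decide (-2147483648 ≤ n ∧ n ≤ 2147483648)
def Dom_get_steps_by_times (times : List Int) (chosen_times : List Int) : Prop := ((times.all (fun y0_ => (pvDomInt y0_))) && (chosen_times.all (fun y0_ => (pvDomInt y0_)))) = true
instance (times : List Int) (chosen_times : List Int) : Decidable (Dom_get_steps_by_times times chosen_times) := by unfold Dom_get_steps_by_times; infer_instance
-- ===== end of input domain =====

-- B inverts A's loop: one pass over chosen_times with a cursor into times (A passes over times
-- with an index into chosen_times). Same O(n+m) cost; the objective is an alternative decomposition.

-- ===== PORT A =====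
-- A's for-loop over range(len(times)) with early return, as fuel recursion (fuel = remaining iterations).
def pvA_loop (times : List Int) (chosen : List Int) (fuel : Nat) (i : Nat) (ci : Nat)
    (acc : List Int) : List Int :=
  match fuel with
  | 0 =>
    -- loop fell through: Python's `i` is now len(times)-1 (only read when ci ≠ len(chosen))
    if ci ≠ chosen.length then acc ++ [(times.length : Int) - 1] else acc
  | fuel + 1 =>
    if ((PySem.List.pyGet? times (i : Int)).getD 0) ≥ ((PySem.List.pyGet? chosen (ci : Int)).getD 0) then
      let acc' := acc ++ [(i : Int)]
      if ci + 1 = chosen.length then acc'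
      else pvA_loop times chosen fuel (i + 1) (ci + 1) acc'
    else pvA_loop times chosen fuel (i + 1) ci acc

def get_steps_by_times (times : List Int) (chosen_times : List Int) : List Int :=
  pvA_loop times chosen_times times.length 0 0 []

-- ===== PORT B =====
-- `while i < n and times[i] < t: i += 1`
def pvB_adv (times : List Int) (t : Int) (i : Nat) : Nat :=
  if h : i < times.length then
    if times[i] < t then pvB_adv times t (i + 1) else i
  else i
termination_by times.length - i

-- B's for-loop over chosen_times, carrying the cursor i and the accumulator.
def pvB_loop (times : List Int) (chosen : List Int) (i : Nat) (acc : List Int) : List Int :=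
  match chosen with
  | [] => acc
  | t :: rest =>
    let j := pvB_adv times t i
    if j = times.length then acc ++ [(times.length : Int) - 1]
    else pvB_loop times rest (j + 1) (acc ++ [(j : Int)])

def get_steps_by_times_alt (times : List Int) (chosen_times : List Int) : List Int :=
  pvB_loop times chosen_times 0 []

-- ===== PRECONDITION & SPEC =====
-- Pre_ excludes exactly the inputs on which A raises: chosen_times = [] ≠ times (IndexError on
-- chosen_times[0]) and times = [] ≠ chosen_times (NameError: `i` unbound after the empty loop).
def Pre_get_steps_by_times (times : List Int) (chosen_times : List Int) : Prop :=
  (times = [] ∧ chosen_times = []) ∨ (times ≠ [] ∧ chosen_times ≠ [])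
instance (times : List Int) (chosen_times : List Int) : Decidable (Pre_get_steps_by_times times chosen_times) := by unfold Pre_get_steps_by_times; infer_instance

def pvWitness_get_steps_by_times : List Int × List Int := ([1, 3, 5], [2, 4])

def Spec_get_steps_by_times (times : List Int) (chosen_times : List Int) (out : List Int) : Prop := out = get_steps_by_times_alt times chosen_times
instance (times : List Int) (chosen_times : List Int) (out : List Int) : Decidable (Spec_get_steps_by_times times chosen_times out) := by unfold Spec_get_steps_by_times; infer_instance

-- ===== CLAIM (what is proved, stated in full; the proofs are below) =====
def Claim_equal_get_steps_by_times : Prop := ∀ (times : List Int) (chosen_times : List Int), Dom_get_steps_by_times times chosen_times → Pre_get_steps_by_times times chosen_times → Spec_get_steps_by_times times chosen_times (get_steps_by_times times chosen_times)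

-- ===== LEMMAS AND PROOFS =====

lemma pvB_adv_ge (times : List Int) (t : Int) (i : Nat) (h : i < times.length)
    (ht : ¬ times[i] < t) : pvB_adv times t i = i := by
  unfold pvB_adv; simp [h, ht]

lemma pvB_adv_lt (times : List Int) (t : Int) (i : Nat) (h : i < times.length)
    (ht : times[i] < t) : pvB_adv times t i = pvB_adv times t (i + 1) := by
  conv_lhs => unfold pvB_adv
  simp [h, ht]

lemma pvB_adv_end (times : List Int) (t : Int) (i : Nat) (h : ¬ i < times.length) :
    pvB_adv times t i = i := by
  unfold pvB_adv; simp [h]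

-- main invariant: while chosen indices remain (ci < m) and fuel = n - i, i ≤ n,
-- A's loop from (i, ci, acc) computes B's loop on the suffix chosen.drop ci.
lemma pv_key (times chosen : List Int) :
    ∀ (fuel i ci : Nat) (acc : List Int), fuel = times.length - i → i ≤ times.length →
      ci < chosen.length →
      pvA_loop times chosen fuel i ci acc = pvB_loop times (chosen.drop ci) i acc := by
  intro fuel
  induction fuel with
  | zero =>
    intro i ci acc hfuel hi hci
    have hin : i = times.length := by omega
    have hdrop : chosen.drop ci = chosen[ci] :: chosen.drop (ci + 1) :=
      (List.getElem_cons_drop (as := chosen) (i := ci) hci).symm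
    subst hin
    have hadv : pvB_adv times chosen[ci] times.length = times.length :=
      pvB_adv_end times chosen[ci] times.length (by omega)
    rw [hdrop]
    unfold pvA_loop pvB_loop
    simp [hadv, Nat.ne_of_lt hci]
  | succ fuel ih =>
    intro i ci acc hfuel hi hci
    have hiLt : i < times.length := by omega
    have hdrop : chosen.drop ci = chosen[ci] :: chosen.drop (ci + 1) :=
      (List.getElem_cons_drop (as := chosen) (i := ci) hci).symm
    have hget_t : (PySem.List.pyGet? times (i : Int)).getD 0 = times[i] := by
      simp [PySem.List.pyGet?, PySem.List.pyIdx?, hiLt]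
    have hget_c : (PySem.List.pyGet? chosen (ci : Int)).getD 0 = chosen[ci] := by
      simp [PySem.List.pyGet?, PySem.List.pyIdx?, hci]
    by_cases hcmp : times[i] ≥ chosen[ci]
    · -- match: A appends i, advances ci; B's adv stops at i immediately
      have hadv : pvB_adv times chosen[ci] i = i :=
        pvB_adv_ge times chosen[ci] i hiLt (by omega)
      rw [hdrop]
      unfold pvA_loop pvB_loop
      simp only [hget_t, hget_c, if_pos hcmp, hadv, if_neg (Nat.ne_of_lt hiLt)]
      by_cases hdone : ci + 1 = chosen.length
      · simp [hdone, pvB_loop]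
      · simp only [if_neg hdone]
        exact ih (i + 1) (ci + 1) (acc ++ [(i : Int)]) (by omega) (by omega) (by omega)
    · -- no match: A moves to i+1; B's adv skips over i
      have hadv : pvB_adv times chosen[ci] i = pvB_adv times chosen[ci] (i + 1) :=
        pvB_adv_lt times chosen[ci] i hiLt (by omega)
      rw [hdrop]
      unfold pvA_loop
      simp only [hget_t, hget_c, if_neg hcmp]
      rw [ih (i + 1) ci acc (by omega) (by omega) hci, hdrop]
      unfold pvB_loop
      simp only [hadv]

-- ===== VERDICT (by name: the statement is the Claim_ definition above) =====
theorem get_steps_by_times_spec : Claim_equal_get_steps_by_times := by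
  intro times chosen_times _ hpre
  unfold Spec_get_steps_by_times get_steps_by_times get_steps_by_times_alt
  rcases hpre with ⟨ht, hc⟩ | ⟨ht, hc⟩
  · subst ht; subst hc; rfl
  · have hm : 0 < chosen_times.length := List.length_pos_of_ne_nil hc
    have := pv_key times chosen_times times.length 0 0 [] (by omega) (by omega) hm
    simpa using this
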